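-- pv_equiv track=rewrite | github.com/ViktoriaMira/proj | prjct1.py | make_trigrams
-- ===== SOURCE A (Python) =====
-- def make_trigrams(tokens):
--     t0, t1 = '$', '$'
--     for t2 in tokens:
--         yield t0, t1, t2
--         if t2 in '.!?':
--             yield t1, t2, '$'
--             yield t2, '$','$'
--             t0, t1 = '$', '$'
--         else:
--             t0, t1 = t1, t2
-- ===== SOURCE B (Python) =====
-- def make_trigrams(tokens):
--     # Sentence-buffer decomposition: collect tokens of the current sentence,
--     # then slide a width-3 window over the padded sentence.
--     buf = []
--     for t in tokens:
--         buf.append(t)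
--         if t in '.!?':
--             padded = ['$', '$'] + buf + ['$', '$']
--             for i in range(len(padded) - 2):
--                 yield padded[i], padded[i + 1], padded[i + 2]
--             buf = []
--     if buf:
--         padded = ['$', '$'] + buf
--         for i in range(len(padded) - 2):
--             yield padded[i], padded[i + 1], padded[i + 2]
-- ===== Notes on version B (the rewrite author's own statement) =====
-- stated objective: alternative
-- what changed: B buffers each sentence and emits trigrams by sliding a width-3 window over the '$'-padded sentence, instead of A's inline (t0,t1) running-state update per token.
import Mathlib
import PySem

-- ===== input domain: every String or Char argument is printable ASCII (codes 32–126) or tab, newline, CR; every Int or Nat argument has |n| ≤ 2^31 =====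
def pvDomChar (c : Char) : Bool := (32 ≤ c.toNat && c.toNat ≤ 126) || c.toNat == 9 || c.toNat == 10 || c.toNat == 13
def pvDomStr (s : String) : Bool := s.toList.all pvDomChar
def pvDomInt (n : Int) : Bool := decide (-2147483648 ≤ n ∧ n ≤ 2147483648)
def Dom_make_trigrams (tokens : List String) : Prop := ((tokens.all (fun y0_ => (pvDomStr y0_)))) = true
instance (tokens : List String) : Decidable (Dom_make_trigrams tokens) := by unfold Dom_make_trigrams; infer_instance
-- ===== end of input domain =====

-- B buffers each sentence and slides a width-3 window over the '$'-padded sentence,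
-- instead of A's inline (t0,t1) running-state update; alternative decomposition, same cost.


-- shared by both Pythons verbatim: the test `t in '.!?'`
def pvSep (t : String) : Bool := PySem.Str.isIn t ".!?"

-- ===== PORT A =====
-- A's generator loop with running state (t0, t1)
def pvLoopA (t0 t1 : String) : List String → List (String × String × String)
  | [] => []
  | t2 :: rest =>
    (t0, t1, t2) ::
      (if pvSep t2 then (t1, t2, "$") :: (t2, "$", "$") :: pvLoopA "$" "$" rest
       else pvLoopA t1 t2 rest)

def make_trigrams (tokens : List String) : List (String × String × String) :=
  pvLoopA "$" "$" tokens

-- ===== PORT B =====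
-- width-3 sliding window over a list (Source B's index loop over `padded`)
def pvWindows3 : List String → List (String × String × String)
  | a :: b :: c :: rest => (a, b, c) :: pvWindows3 (b :: c :: rest)
  | _ => []

-- B's loop: accumulate the current sentence in buf, flush on a separator token
def pvLoopB : List String → List String → List (String × String × String)
  | buf, [] => if buf.isEmpty then [] else pvWindows3 ("$" :: "$" :: buf)
  | buf, t :: rest =>
    if pvSep t then
      pvWindows3 (("$" :: "$" :: (buf ++ [t])) ++ ["$", "$"]) ++ pvLoopB [] rest
    else
      pvLoopB (buf ++ [t]) rest

def make_trigrams_alt (tokens : List String) : List (String × String × String) :=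
  pvLoopB [] tokens

-- ===== PRECONDITION & SPEC =====
def Spec_make_trigrams (tokens : List String) (out : List (String × String × String)) : Prop := out = make_trigrams_alt tokens
instance (tokens : List String) (out : List (String × String × String)) : Decidable (Spec_make_trigrams tokens out) := by unfold Spec_make_trigrams; infer_instance

-- ===== CLAIM (what is proved, stated in full; the proofs are below) =====
def Claim_equal_make_trigrams : Prop := ∀ (tokens : List String), Dom_make_trigrams tokens → Spec_make_trigrams tokens (make_trigrams tokens)

-- ===== LEMMAS AND PROOFS =====

-- the last two elements of a list seen as a::b::l (A's running state after consuming l)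
def pvLast2 (a b : String) : List String → String × String
  | [] => (a, b)
  | c :: r => pvLast2 b c r

theorem pvLast2_snoc (l : List String) (a b x : String) :
    pvLast2 a b (l ++ [x]) = ((pvLast2 a b l).2, x) := by
  induction l generalizing a b with
  | nil => simp [pvLast2]
  | cons c r ih => simp [pvLast2, ih]

theorem pvWindows3_snoc (l : List String) (a b x : String) :
    pvWindows3 (a :: b :: (l ++ [x])) =
      pvWindows3 (a :: b :: l) ++ [((pvLast2 a b l).1, (pvLast2 a b l).2, x)] := by
  induction l generalizing a b with
  | nil => simp [pvWindows3, pvLast2]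
  | cons c r ih => simp [pvWindows3, pvLast2, ih]

-- loop invariant: B's pending buffer equals the windows A has already emitted
-- for the current sentence, and A's running state is the last two padded elements
theorem pvLoopB_eq (ts : List String) : ∀ buf : List String,
    pvLoopB buf ts =
      pvWindows3 ("$" :: "$" :: buf) ++
        pvLoopA (pvLast2 "$" "$" buf).1 (pvLast2 "$" "$" buf).2 ts := by
  induction ts with
  | nil =>
    intro buf
    cases buf with
    | nil => simp [pvLoopB, pvWindows3, pvLoopA]
    | cons c r => simp [pvLoopB, pvLoopA]
  | cons t rest ih =>
    intro buf
    by_cases h : pvSep t = true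
    · have h1 : ("$" :: "$" :: (buf ++ [t])) ++ ["$", "$"]
          = "$" :: "$" :: ((((buf ++ [t]) ++ ["$"]) ++ ["$"])) := by simp
      simp only [pvLoopB, h, if_pos, h1, pvWindows3_snoc, pvLast2_snoc, ih []]
      simp [pvLoopA, h, pvLast2, pvWindows3]
    · have h2 : pvLast2 "$" "$" (buf ++ [t]) = ((pvLast2 "$" "$" buf).2, t) :=
        pvLast2_snoc buf "$" "$" t
      simp only [pvLoopB, h, if_neg, Bool.false_eq_true, not_false_iff, ih (buf ++ [t]),
        pvWindows3_snoc, h2]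
      simp [pvLoopA, h]

-- ===== VERDICT (by name: the statement is the Claim_ definition above) =====
theorem make_trigrams_spec : Claim_equal_make_trigrams := by
  intro tokens _
  unfold Spec_make_trigrams make_trigrams make_trigrams_alt
  simp [pvLoopB_eq, pvWindows3, pvLast2]
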